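-- pv_equiv track=rewrite | github.com/udhayprakash/Python_for_interview_preparation | code_test/problem.py | max_n_min_rotation
-- ===== SOURCE A (Python) =====
-- def max_n_min_rotation(A):
--     """
--     :type A: List[int]
--     :rtype: int
--     """
--     max_val = min_val = 0
--     for _index, _ in enumerate(A):
--         shift_array = A[_index:] + A[:_index]
--         array_sum = sum(
--             [indx * val for indx, val in enumerate(shift_array)])
--         if _index:
--             if array_sum < min_val:
--                 min_val = array_sum
--             if array_sum > max_val:
--                 max_val = array_sum
--         else:
--             min_val = max_val = array_sum
--
--     return max_val, min_val
-- ===== SOURCE B (Python) =====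
-- def max_n_min_rotation(A):
--     n = len(A)
--     total = sum(A)
--     cur = sum(i * v for i, v in enumerate(A))
--     mx = mn = cur
--     for k in range(1, n):
--         cur = cur - total + n * A[k - 1]
--         if cur > mx:
--             mx = cur
--         if cur < mn:
--             mn = cur
--     return mx, mn
-- ===== Notes on version B (the rewrite author's own statement) =====
-- stated objective: faster
-- what changed: Replaces the O(n^2) rebuild-each-rotation-and-resum loop with the incremental recurrence S_{k} = S_{k-1} - total + n*A[k-1], tracking max/min in one O(n) pass.
import Mathlib
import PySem

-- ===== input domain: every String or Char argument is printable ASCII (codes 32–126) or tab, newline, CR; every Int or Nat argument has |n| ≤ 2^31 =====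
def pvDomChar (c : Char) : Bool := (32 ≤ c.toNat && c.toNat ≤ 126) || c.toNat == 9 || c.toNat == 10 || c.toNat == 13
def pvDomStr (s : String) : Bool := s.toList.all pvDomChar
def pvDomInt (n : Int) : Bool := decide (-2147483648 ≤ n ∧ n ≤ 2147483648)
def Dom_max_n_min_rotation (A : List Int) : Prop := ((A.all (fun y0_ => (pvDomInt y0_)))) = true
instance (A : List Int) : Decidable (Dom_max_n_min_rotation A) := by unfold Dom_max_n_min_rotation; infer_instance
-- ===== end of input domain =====

-- B replaces A's per-rotation slice-and-resum (O(n^2)) with the incremental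
-- recurrence S_k = S_{k-1} - total + n*A[k-1] in one O(n) pass (faster, asymptotic).


-- ===== PORT A =====
-- literal transliteration: for each index, build the rotated list by slicing,
-- re-sum the weighted comprehension, then update (max_val, min_val); the loop
-- body is factored into stepA for the proofs, unchanged.
def stepA (A : List Int) (st : Int × Int) (p : Int × Int) : Int × Int :=
  let shift_array := PySem.List.slice A (some p.1) none ++ PySem.List.slice A none (some p.1)
  let array_sum := ((PySem.List.enumerate shift_array 0).map (fun q => q.1 * q.2)).sum
  if p.1 ≠ 0 then
    (if array_sum > st.1 then array_sum else st.1,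
     if array_sum < st.2 then array_sum else st.2)
  else (array_sum, array_sum)

def max_n_min_rotation (A : List Int) : Int × Int :=
  let st := (PySem.List.enumerate A 0).foldl (stepA A) (0, 0)
  (st.1, st.2)

-- ===== PORT B =====
-- literal transliteration of Source B: one pass, cur = cur - total + n*A[k-1];
-- the loop body is factored into stepB, unchanged.
def stepB (A : List Int) (st : Int × Int × Int) (k : Int) : Int × Int × Int :=
  let cur := st.1 - A.sum + (A.length : Int) * PySem.List.pyGetD A (k - 1) 0
  (cur,
   if cur > st.2.1 then cur else st.2.1,
   if cur < st.2.2 then cur else st.2.2)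

def max_n_min_rotation_alt (A : List Int) : Int × Int :=
  let n : Int := A.length
  let cur0 : Int := ((PySem.List.enumerate A 0).map (fun q => q.1 * q.2)).sum
  let res := (PySem.List.pyRange 1 n 1).foldl (stepB A) (cur0, cur0, cur0)
  (res.2.1, res.2.2)

-- ===== PRECONDITION & SPEC =====
def Spec_max_n_min_rotation (A : List Int) (out : Int × Int) : Prop := out = max_n_min_rotation_alt A
instance (A : List Int) (out : Int × Int) : Decidable (Spec_max_n_min_rotation A out) := by unfold Spec_max_n_min_rotation; infer_instance

-- ===== CLAIM (what is proved, stated in full; the proofs are below) =====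
def Claim_equal_max_n_min_rotation : Prop := ∀ (A : List Int), Dom_max_n_min_rotation A → Spec_max_n_min_rotation A (max_n_min_rotation A)

-- ===== LEMMAS AND PROOFS =====

-- weighted index sum Σ (s+i)*l[i], and the rotation value at cut k
def wsumF (l : List Int) (s : Int) : Int :=
  ((PySem.List.enumerate l s).map (fun q => q.1 * q.2)).sum

def rotVal (A : List Int) (k : Nat) : Int := wsumF (A.drop k ++ A.take k) 0

theorem wsumF_cons (x : Int) (l : List Int) (s : Int) :
    wsumF (x :: l) s = s * x + wsumF l (s + 1) := by
  simp [wsumF, PySem.List.enumerate_cons]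

theorem wsumF_shift (l : List Int) (s : Int) :
    wsumF l (s + 1) = wsumF l s + l.sum := by
  induction l generalizing s with
  | nil => simp [wsumF]
  | cons x t ih =>
      rw [wsumF_cons, wsumF_cons, ih (s+1), ih s]
      simp only [List.sum_cons]; ring

theorem wsumF_append_singleton' (l : List Int) (x : Int) (s : Int) :
    wsumF (l ++ [x]) s = wsumF l s + (s + l.length) * x := by
  induction l generalizing s with
  | nil => simp [wsumF, PySem.List.enumerate_cons, PySem.List.enumerate_nil]
  | cons y t ih =>
      rw [List.cons_append, wsumF_cons, wsumF_cons, ih (s+1)]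
      simp only [List.length_cons]; push_cast; ring

-- the key recurrence: rotVal (k+1) = rotVal k - sum + n * A[k]
theorem rotVal_succ (A : List Int) (k : Nat) (hk : k < A.length) :
    rotVal A (k + 1) = rotVal A k - A.sum + (A.length : Int) * A[k] := by
  have hdrop : A.drop k = A[k] :: A.drop (k + 1) := List.drop_eq_getElem_cons hk
  have htake : A.take (k + 1) = A.take k ++ [A[k]] := by
    rw [List.take_add_one]; simp [List.getElem?_eq_getElem hk]
  have hsumA : A.sum = (A.take k).sum + A[k] + (A.drop (k + 1)).sum := by
    conv_lhs => rw [← List.take_append_drop k A, hdrop]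
    rw [List.sum_append, List.sum_cons]; ring
  have hlen : (((A.drop (k + 1) ++ A.take k).length : Nat) : Int) = (A.length : Int) - 1 := by
    simp [List.length_append, List.length_drop, List.length_take]; omega
  have h1 : rotVal A k = wsumF (A.drop (k + 1) ++ A.take k) 0 + (A.drop (k + 1) ++ A.take k).sum := by
    rw [rotVal, hdrop, List.cons_append, wsumF_cons]
    rw [show (0 : Int) + 1 = 0 + 1 from rfl, wsumF_shift]; ring
  have h2 : rotVal A (k + 1) = wsumF (A.drop (k + 1) ++ A.take k) 0 + ((A.length : Int) - 1) * A[k] := by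
    rw [rotVal, htake, ← List.append_assoc, wsumF_append_singleton', hlen]; ring
  have hsumM : (A.drop (k + 1) ++ A.take k).sum = A.sum - A[k] := by
    rw [List.sum_append]; omega
  rw [h1, h2, hsumM]; ring

-- the common max/min accumulation over the list of rotation values
def refStep (st : Int × Int) (v : Int) : Int × Int :=
  (if v > st.1 then v else st.1, if v < st.2 then v else st.2)

def refFold (vs : List Int) (st : Int × Int) : Int × Int := vs.foldl refStep st

-- Port A's fold, past index 0, is refFold over the rotation values
theorem portA_tail (A : List Int) (l : List Int) :
    ∀ (s : Int) (st : Int × Int), 1 ≤ s →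
      (PySem.List.enumerate l s).foldl (stepA A) st
      = refFold ((List.range' s.toNat l.length).map (rotVal A)) st := by
  induction l with
  | nil => intro s st _; simp [refFold, PySem.List.enumerate_nil]
  | cons y t ih =>
      intro s st hs
      rw [PySem.List.enumerate_cons, List.foldl_cons]
      simp only [List.length_cons]
      rw [List.range'_succ, List.map_cons, refFold, List.foldl_cons]
      have hs0 : (0 : Int) ≤ s := by omega
      have hstep : stepA A st (s, y) = refStep st (rotVal A s.toNat) := by
        have hne : s ≠ 0 := by omega
        simp only [stepA, PySem.List.slice_from A hs0, PySem.List.slice_to A hs0,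
          hne, ne_eq, not_false_eq_true, if_true, refStep]
        rfl
      rw [hstep, ih (s + 1) _ (by omega), show (s + 1).toNat = s.toNat + 1 by omega]
      rfl

-- Port B's fold maintains cur = rotVal A (j-1) and accumulates refFold
theorem portB_loop (A : List Int) :
    ∀ (c j : Nat) (st : Int × Int), 1 ≤ j → j + c = A.length →
      ((PySem.List.pyRange (j : Int) (A.length : Int) 1).foldl (stepB A)
        (rotVal A (j - 1), st)).2
      = refFold ((List.range' j c).map (rotVal A)) st := by
  intro c
  induction c with
  | zero =>
      intro j st _ hj
      rw [PySem.List.pyRange_one_eq_nil (by omega : (A.length : Int) ≤ (j : Int))]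
      simp [refFold]
  | succ c ih =>
      intro j st hj hlen
      rw [PySem.List.pyRange_one_cons (by exact_mod_cast (by omega : j < A.length)),
          List.foldl_cons, List.range'_succ, List.map_cons, refFold, List.foldl_cons]
      have hjk : j - 1 < A.length := by omega
      have hcur : stepB A (rotVal A (j - 1), st) (j : Int)
          = (rotVal A j, refStep st (rotVal A j)) := by
        have hidx : ((j : Int) - 1) = ((j - 1 : Nat) : Int) := by omega
        have hget : PySem.List.pyGetD A ((j : Int) - 1) 0 = A[j - 1] := by
          rw [hidx, PySem.List.pyGetD_natCast, List.getD_eq_getElem A 0 hjk]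
        have hrec : rotVal A j = rotVal A (j - 1) - A.sum + (A.length : Int) * A[j - 1] := by
          have := rotVal_succ A (j - 1) hjk
          rwa [show j - 1 + 1 = j by omega] at this
        simp only [stepB, hget, refStep, ← hrec]
      rw [hcur, show (j : Int) + 1 = ((j + 1 : Nat) : Int) by push_cast; ring]
      have ih' := ih (j + 1) (refStep st (rotVal A j)) (by omega) (by omega)
      rw [show j + 1 - 1 = j by omega] at ih'
      rw [ih']
      rfl

theorem wsumF_rot_zero (A : List Int) : rotVal A 0 = wsumF A 0 := by
  simp [rotVal]

-- ===== VERDICT (by name: the statement is the Claim_ definition above) =====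
theorem max_n_min_rotation_spec : Claim_equal_max_n_min_rotation := by
  intro A _
  unfold Spec_max_n_min_rotation
  cases A with
  | nil => decide
  | cons x t =>
      have hstep0 : stepA (x :: t) (0, 0) (0, x) = (rotVal (x :: t) 0, rotVal (x :: t) 0) := by
        simp only [stepA, if_neg (by simp : ¬ ((0 : Int) ≠ 0))]
        rw [PySem.List.slice_from (x :: t) (le_refl 0), PySem.List.slice_to (x :: t) (le_refl 0)]
        simp [rotVal, wsumF]
      have hA : max_n_min_rotation (x :: t)
          = (PySem.List.enumerate (x :: t) 0).foldl (stepA (x :: t)) (0, 0) := rfl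
      have hB : max_n_min_rotation_alt (x :: t)
          = ((PySem.List.pyRange 1 (((x :: t).length : Nat) : Int) 1).foldl (stepB (x :: t))
              (wsumF (x :: t) 0, wsumF (x :: t) 0, wsumF (x :: t) 0)).2 := rfl
      have hv0 : wsumF (x :: t) 0 = rotVal (x :: t) 0 := (wsumF_rot_zero (x :: t)).symm
      rw [hA, hB, hv0, PySem.List.enumerate_cons, List.foldl_cons, hstep0,
          show (0 : Int) + 1 = 1 from rfl,
          portA_tail (x :: t) t 1 _ (le_refl 1)]
      have hloop := portB_loop (x :: t) t.length 1 (rotVal (x :: t) 0, rotVal (x :: t) 0)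
        (le_refl 1) (by simp only [List.length_cons]; omega)
      rw [Nat.cast_one] at hloop
      rw [show ((1 : Int)).toNat = 1 from rfl]
      exact hloop.symm
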